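-- pv_equiv track=rewrite | github.com/ucas-zc/MiniAlphaGo | Algorithm/SearchMgr.py | DumbScore
-- ===== SOURCE A (Python) =====
-- def DumbScore(state, player):
--     score = 0
--     for _col in state:
--         for _row in _col:
--             if _row == player:
--                 score += 1
--             else:
--                 score -= 1
--     return score
-- ===== SOURCE B (Python) =====
-- def DumbScore(state, player):
--     total = sum(len(col) for col in state)
--     player_count = sum(col.count(player) for col in state)
--     return 2 * player_count - total
-- ===== Notes on version B (the rewrite author's own statement) =====
-- stated objective: simpler
-- what changed: Replaces the per-cell +/-1 branching double loop by two aggregates (total cell count and player-cell count) combined with the closed form 2*player_count - total.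
import Mathlib
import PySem

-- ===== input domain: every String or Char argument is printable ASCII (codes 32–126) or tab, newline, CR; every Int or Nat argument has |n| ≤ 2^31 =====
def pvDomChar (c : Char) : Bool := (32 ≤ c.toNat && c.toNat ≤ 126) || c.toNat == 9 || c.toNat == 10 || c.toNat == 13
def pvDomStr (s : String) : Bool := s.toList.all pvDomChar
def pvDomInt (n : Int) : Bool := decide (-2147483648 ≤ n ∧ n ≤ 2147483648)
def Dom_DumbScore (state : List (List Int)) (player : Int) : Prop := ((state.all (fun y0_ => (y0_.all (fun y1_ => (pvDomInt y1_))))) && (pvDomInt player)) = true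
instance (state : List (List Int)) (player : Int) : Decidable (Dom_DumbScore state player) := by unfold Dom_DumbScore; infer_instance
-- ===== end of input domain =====

-- ===== PORT A =====
-- Port of A: nested fold over columns/rows with a running +/-1 score.
def DumbScore (state : List (List Int)) (player : Int) : Int :=
  state.foldl (fun score col =>
    col.foldl (fun score row => if row == player then score + 1 else score - 1) score) 0

-- ===== PORT B =====
-- Port of B: two aggregates and a closed-form combination 2*k - n.
def DumbScore_alt (state : List (List Int)) (player : Int) : Int :=
  let total : Int := (state.map (fun col => (col.length : Int))).sum
  let player_count : Int := (state.map (fun col => (PySem.List.count col player : Int))).sum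
  2 * player_count - total

-- ===== PRECONDITION & SPEC =====
def Spec_DumbScore (state : List (List Int)) (player : Int) (out : Int) : Prop := out = DumbScore_alt state player
instance (state : List (List Int)) (player : Int) (out : Int) : Decidable (Spec_DumbScore state player out) := by unfold Spec_DumbScore; infer_instance

-- ===== CLAIM (what is proved, stated in full; the proofs are below) =====
def Claim_equal_DumbScore : Prop := ∀ (state : List (List Int)) (player : Int), Dom_DumbScore state player → Spec_DumbScore state player (DumbScore state player)

-- ===== LEMMAS AND PROOFS =====

-- ===== VERDICT (by name: the statement is the Claim_ definition above) =====
theorem inner_score (col : List Int) (player : Int) (s : Int) :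
    col.foldl (fun score row => if row == player then score + 1 else score - 1) s
      = s + 2 * (PySem.List.count col player : Int) - (col.length : Int) := by
  induction col generalizing s with
  | nil => simp [PySem.List.count]
  | cons x xs ih =>
    simp only [List.foldl_cons, ih, PySem.List.count, List.count_cons, List.length_cons]
    by_cases h : x = player
    · simp [h]; ring
    · have hb : ¬ (x == player) := by simpa using h
      simp [h, hb]; ring

theorem outer_score (state : List (List Int)) (player : Int) (s : Int) :
    state.foldl (fun score col =>
      col.foldl (fun score row => if row == player then score + 1 else score - 1) score) s
      = s + 2 * (state.map (fun col => (PySem.List.count col player : Int))).sum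
          - (state.map (fun col => (col.length : Int))).sum := by
  induction state generalizing s with
  | nil => simp
  | cons c cs ih =>
    rw [List.foldl_cons, inner_score, ih, List.map_cons, List.sum_cons,
      List.map_cons, List.sum_cons]
    ring

theorem DumbScore_spec : Claim_equal_DumbScore := by
  intro state player _
  unfold Spec_DumbScore DumbScore DumbScore_alt
  simp only [outer_score]
  ring
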